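-- pv_equiv track=rewrite | github.com/Aghon5304/pp1 | 04-Subroutines/exercise44.py | f
-- ===== SOURCE A (Python) =====
-- def f(password):
--     wynik=True
--     if len(password)>=6:
--         for x in password:
--             count=0
--             for y in password:
--                 if x==y:
--                     count+=1
--                     if count>1:
--                         wynik = False
--     else:
--         return False
--
--     return wynik
-- ===== SOURCE B (Python) =====
-- def f(password):
--     if len(password) < 6:
--         return False
--     s = sorted(password)
--     for i in range(1, len(s)):
--         if s[i] == s[i - 1]:
--             return False
--     return True
-- ===== Notes on version B (the rewrite author's own statement) =====
-- stated objective: faster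
-- what changed: Replaces the O(n^2) nested pairwise-count loops with sorting the characters and a single adjacent-equal scan.
import Mathlib
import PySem

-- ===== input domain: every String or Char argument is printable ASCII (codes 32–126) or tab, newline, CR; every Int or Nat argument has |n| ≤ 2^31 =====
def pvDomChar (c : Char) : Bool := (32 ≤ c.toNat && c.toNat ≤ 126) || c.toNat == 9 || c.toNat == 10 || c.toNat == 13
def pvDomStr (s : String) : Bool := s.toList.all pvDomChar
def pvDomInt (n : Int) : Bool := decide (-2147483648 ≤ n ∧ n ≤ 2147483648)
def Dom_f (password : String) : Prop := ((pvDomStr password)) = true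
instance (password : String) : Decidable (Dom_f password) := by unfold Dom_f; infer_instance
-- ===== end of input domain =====

-- B replaces A's O(n^2) nested pairwise-count loops by sorting the characters and one adjacent-equal scan (objective: faster).

-- ===== PORT A =====
-- literal port of A: outer loop over characters, inner loop recounting occurrences,
-- wynik set to False once a running count exceeds 1
def f (password : String) : Bool :=
  let cs := password.toList
  if cs.length ≥ 6 then
    cs.foldl (fun wynik x =>
      (cs.foldl (fun (p : Int × Bool) y =>
        if x == y then
          (p.1 + 1, if p.1 + 1 > 1 then false else p.2)
        else p) ((0 : Int), wynik)).2) true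
  else
    false

-- ===== PORT B =====
-- the for-i loop of Source B comparing s[i] with s[i-1], as structural recursion on the sorted list
def fAltScan : List Char → Bool
  | a :: b :: t => if a == b then false else fAltScan (b :: t)
  | _ => true

def f_alt (password : String) : Bool :=
  let cs := password.toList
  if cs.length < 6 then false
  else fAltScan (PySem.List.sorted cs (fun x => x) false)

-- ===== PRECONDITION & SPEC =====
def Spec_f (password : String) (out : Bool) : Prop := out = f_alt password
instance (password : String) (out : Bool) : Decidable (Spec_f password out) := by unfold Spec_f; infer_instance

-- ===== CLAIM (what is proved, stated in full; the proofs are below) =====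
def Claim_equal_f : Prop := ∀ (password : String), Dom_f password → Spec_f password (f password)

-- ===== LEMMAS AND PROOFS =====

-- A's inner loop: final flag = w && not (x occurs in l and the running count c + its occurrences exceeds 1)
lemma inner_loop_eq (x : Char) (l : List Char) (c : Int) (w : Bool) :
    (l.foldl (fun (p : Int × Bool) y =>
        if x == y then (p.1 + 1, if p.1 + 1 > 1 then false else p.2) else p) (c, w)).2
      = (w && !(decide (1 ≤ l.count x) && decide (c + l.count x > 1))) := by
  induction l generalizing c w with
  | nil => simp
  | cons y t ih =>
    by_cases hxy : x = y
    · subst hxy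
      simp only [List.foldl_cons, beq_self_eq_true, if_true, List.count_cons_self]
      rw [ih]
      by_cases h1 : c + 1 > 1
      · simp only [h1, if_true, Bool.false_and]
        have : c + (↑(t.count x) + 1) > 1 := by
          have : (0 : Int) ≤ t.count x := Int.natCast_nonneg _
          omega
        simp [this]
      · simp only [h1, if_false]
        by_cases h2 : 1 ≤ t.count x
        · have hx : c + (↑(t.count x) + 1) > 1 ↔ c + 1 + ↑(t.count x) > 1 := by omega
          have hy : (1:Nat) ≤ t.count x + 1 := by omega
          simp [h2, hy, hx]
        · have h0 : t.count x = 0 := by omega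
          simp only [h0, Nat.cast_zero]
          have hz : ¬ ((1:Nat) ≤ 0) := by omega
          have hc : ¬ (c + ((0:Int) + 1) > 1) := by omega
          simp [hz, h1]
    · rw [List.foldl_cons, if_neg (by simp [hxy]), ih]
      simp [Ne.symm hxy]

-- A's outer loop accumulates a conjunction
lemma outer_loop_eq (g : Char → Bool) (l : List Char) (w : Bool) :
    l.foldl (fun wynik x => wynik && g x) w = (w && l.all g) := by
  induction l generalizing w with
  | nil => simp
  | cons y t ih => simp [List.foldl_cons, ih, Bool.and_assoc]

lemma f_eq_nodup (cs : List Char) :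
    (cs.foldl (fun wynik x =>
      (cs.foldl (fun (p : Int × Bool) y =>
        if x == y then (p.1 + 1, if p.1 + 1 > 1 then false else p.2) else p) ((0 : Int), wynik)).2) true)
      = decide cs.Nodup := by
  have hstep : ∀ w x, (cs.foldl (fun (p : Int × Bool) y =>
        if x == y then (p.1 + 1, if p.1 + 1 > 1 then false else p.2) else p) ((0 : Int), w)).2
      = (w && !(decide (1 ≤ cs.count x) && decide ((0:Int) + cs.count x > 1))) := by
    intro w x; exact inner_loop_eq x cs 0 w
  calc cs.foldl (fun wynik x =>
      (cs.foldl (fun (p : Int × Bool) y =>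
        if x == y then (p.1 + 1, if p.1 + 1 > 1 then false else p.2) else p) ((0 : Int), wynik)).2) true
      = cs.foldl (fun wynik x => wynik && !(decide (1 ≤ cs.count x) && decide ((0:Int) + cs.count x > 1))) true := by
        have hfun : (fun (wynik : Bool) (x : Char) => (cs.foldl (fun (p : Int × Bool) y =>
            if x == y then (p.1 + 1, if p.1 + 1 > 1 then false else p.2) else p) ((0 : Int), wynik)).2)
            = fun wynik x => wynik && !(decide (1 ≤ cs.count x) && decide ((0:Int) + cs.count x > 1)) := by
          funext w x; exact hstep w x
        rw [hfun]
    _ = decide cs.Nodup := by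
        rw [outer_loop_eq, Bool.true_and, Bool.eq_iff_iff]
        rw [List.all_eq_true, decide_eq_true_eq, List.nodup_iff_count_le_one]
        constructor
        · intro hall x
          by_cases hx : x ∈ cs
          · have := hall x hx
            have h1 : 1 ≤ cs.count x := List.one_le_count_iff.mpr hx
            simp [h1] at this
            omega
          · simp [List.count_eq_zero_of_not_mem hx]
        · intro hall x hx
          simp only [Bool.not_and, Bool.or_eq_true, Bool.not_eq_true', decide_eq_false_iff_not, not_le, not_lt]
          right
          have := hall x
          omega
  
-- B's scan on a ≤-sorted list decides Nodup
lemma scan_sorted_eq_nodup (s : List Char) (hs : s.Pairwise (· ≤ ·)) :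
    fAltScan s = decide s.Nodup := by
  induction s with
  | nil => simp [fAltScan]
  | cons a t ih =>
    cases t with
    | nil => simp [fAltScan]
    | cons b u =>
      have hpw : (b :: u).Pairwise (· ≤ ·) := hs.tail
      by_cases hab : a = b
      · subst hab
        have : ¬ (a :: a :: u).Nodup := by simp
        simp [fAltScan, this]
      · have hne : (a == b) = false := by simp [hab]
        rw [show fAltScan (a :: b :: u) = fAltScan (b :: u) by simp [fAltScan, hne]]
        rw [ih hpw]
        have hab' : a < b := lt_of_le_of_ne (by
          have := List.pairwise_cons.mp hs
          exact this.1 b (by simp)) hab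
        have hmem : ∀ x ∈ b :: u, a < x := by
          intro x hx
          rcases List.mem_cons.mp hx with h | h
          · subst h; exact hab'
          · exact lt_of_lt_of_le hab' ((List.pairwise_cons.mp hpw).1 x h)
        have : (a :: b :: u).Nodup ↔ (b :: u).Nodup := by
          constructor
          · exact List.Nodup.of_cons
          · intro h
            refine List.nodup_cons.mpr ⟨?_, h⟩
            intro hmem'
            exact absurd rfl (ne_of_lt (hmem a hmem'))
        simp [this]

lemma f_alt_eq (cs : List Char) :
    fAltScan (PySem.List.sorted cs (fun x => x) false) = decide cs.Nodup := by
  have hperm : (PySem.List.sorted cs (fun x => x) false).Perm cs := PySem.List.sorted_perm ..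
  have hpw : (PySem.List.sorted cs (fun x => x) false).Pairwise (fun a b => (fun x => x) a ≤ (fun x => x) b) :=
    PySem.List.sorted_pairwise ..
  rw [scan_sorted_eq_nodup _ hpw]
  simp [hperm.nodup_iff]

-- ===== VERDICT (by name: the statement is the Claim_ definition above) =====
theorem f_spec : Claim_equal_f := by
  intro password _
  unfold Spec_f f f_alt
  set cs := password.toList with hcs
  by_cases h6 : cs.length ≥ 6
  · have h6' : ¬ cs.length < 6 := by omega
    simp only [h6, if_true, h6', if_false]
    rw [f_eq_nodup cs, f_alt_eq cs]
  · have h6' : cs.length < 6 := by omega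
    simp [h6, h6']
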